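-- pv_equiv track=rewrite | github.com/lephubui/command-code | youtube/python/problems/operands_scan.py | solution
-- ===== SOURCE A (Python) =====
-- import heapq
--
-- def solution(operations):
--     max_output = []
--     nums = []
--     for pair in operations:
--         if pair[0] == 'Add':
--             heapq.heappush(nums, -pair[1])
--         elif pair[0] == 'Max' and nums:
--             max_output.append(-nums[0])
--         else:
--             heapq.heappop(nums)
--
--     return max_output
-- ===== SOURCE B (Python) =====
-- import bisect
--
-- def solution(operations):
--     max_output = []
--     nums = []
--     for pair in operations:
--         if pair[0] == 'Add':
--             bisect.insort(nums, pair[1])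
--         elif pair[0] == 'Max' and nums:
--             max_output.append(nums[-1])
--         else:
--             nums.pop()
--     return max_output
-- ===== Notes on version B (the rewrite author's own statement) =====
-- stated objective: simpler
-- what changed: The binary max-heap (heapq on negated values, sift-up/sift-down) is replaced by a plain list kept in ascending order with bisect.insort: max is the last element and the pop branch drops it, with the same three-branch control flow.
import Mathlib
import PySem

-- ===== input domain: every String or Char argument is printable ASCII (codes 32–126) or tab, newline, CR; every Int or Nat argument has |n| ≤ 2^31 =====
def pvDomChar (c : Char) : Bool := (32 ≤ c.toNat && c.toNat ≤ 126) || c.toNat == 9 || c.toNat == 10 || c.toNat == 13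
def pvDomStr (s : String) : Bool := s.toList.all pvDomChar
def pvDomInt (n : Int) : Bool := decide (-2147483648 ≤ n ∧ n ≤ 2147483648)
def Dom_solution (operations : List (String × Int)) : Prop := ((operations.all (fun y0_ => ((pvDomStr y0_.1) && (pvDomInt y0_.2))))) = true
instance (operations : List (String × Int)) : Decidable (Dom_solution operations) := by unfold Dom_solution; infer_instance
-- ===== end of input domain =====

-- B replaces the heapq max-heap by a plain ascending sorted list (bisect.insort); equal outputs on all
-- inputs where A raises no IndexError (Pre_ below excludes the pop-on-empty runs, where both raise).

-- ===== PORT A =====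
-- CPython heapq._siftdown: bubble newitem up along the parent chain from `pos` towards `startpos`.
def siftdownLoop (heap : List Int) (newitem : Int) (startpos pos : Nat) : List Int :=
  if _h : startpos < pos then
    let parentpos := (pos - 1) / 2
    let parent := heap.getD parentpos 0
    if newitem < parent then
      siftdownLoop (heap.set pos parent) newitem startpos parentpos
    else heap.set pos newitem
  else heap.set pos newitem
termination_by pos
decreasing_by omega

-- CPython heapq._siftup: move the hole at `pos` down to a leaf pulling the smaller child up,
-- place newitem there, then _siftdown.  (list indexing is in range in every call; getD is exact there)
def siftupLoop (heap : List Int) (newitem : Int) (startpos pos : Nat) : List Int :=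
  -- childpos = 2*pos+1, rightpos = childpos+1; the childpos' selection is inlined into each branch
  if _hc : 2 * pos + 1 < heap.length then
    if 2 * pos + 2 < heap.length ∧ ¬ (heap.getD (2 * pos + 1) 0 < heap.getD (2 * pos + 2) 0)
    then siftupLoop (heap.set pos (heap.getD (2 * pos + 2) 0)) newitem startpos (2 * pos + 2)
    else siftupLoop (heap.set pos (heap.getD (2 * pos + 1) 0)) newitem startpos (2 * pos + 1)
  else
    siftdownLoop (heap.set pos newitem) newitem startpos pos
termination_by heap.length - pos
decreasing_by all_goals simp only [List.length_set]; omega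

-- heapq.heappush: append then _siftdown(heap, 0, len-1)
def heappush (heap : List Int) (item : Int) : List Int :=
  siftdownLoop (heap ++ [item]) item 0 heap.length

-- heapq.heappop: pop the last element; if the heap is nonempty put it at the root and _siftup(heap, 0).
-- (returns only the remaining heap: A discards heappop's return value; on [] Python raises — excluded by Pre_)
def heappop (heap : List Int) : List Int :=
  let lastelt := heap.getD (heap.length - 1) 0
  let rest := heap.dropLast
  if rest.isEmpty then rest
  else
    let rest' := rest.set 0 lastelt
    siftupLoop rest' (rest'.getD 0 0) 0 0

def solutionLoop (ops : List (String × Int)) (nums : List Int) (out : List Int) : List Int :=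
  match ops with
  | [] => out
  | (op, v) :: rest =>
    if op = "Add" then solutionLoop rest (heappush nums (-v)) out
    else if op = "Max" ∧ nums ≠ [] then solutionLoop rest nums (out ++ [-(nums.getD 0 0)])
    else solutionLoop rest (heappop nums) out

def solution (operations : List (String × Int)) : List Int :=
  solutionLoop operations [] []

-- ===== PORT B =====
-- bisect.insort = insertion into the ascending sorted list (value-equal to orderedInsert on Int);
-- nums[-1] on the nonempty branch is the last element; nums.pop() drops it.
def solutionAltLoop (ops : List (String × Int)) (nums : List Int) (out : List Int) : List Int :=
  match ops with
  | [] => out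
  | (op, v) :: rest =>
    if op = "Add" then solutionAltLoop rest (List.orderedInsert (· ≤ ·) v nums) out
    else if op = "Max" ∧ nums ≠ [] then solutionAltLoop rest nums (out ++ [nums.getLastD 0])
    else solutionAltLoop rest nums.dropLast out

def solution_alt (operations : List (String × Int)) : List Int :=
  solutionAltLoop operations [] []

-- ===== PRECONDITION & SPEC =====
-- pvSize tracks only the NUMBER of stored elements along the run: some k = k elements stored so far,
-- none = some operation popped (or fell through to pop) an empty structure, where Python raises IndexError.
def pvSize : List (String × Int) → Nat → Option Nat
  | [], k => some k
  | (op, _) :: rest, k =>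
    if op = "Add" then pvSize rest (k + 1)
    else if op = "Max" ∧ k ≠ 0 then pvSize rest k
    else if k ≠ 0 then pvSize rest (k - 1)
    else none

-- Pre_ excludes exactly the runs on which A raises IndexError (heappop of an empty list: a 'Max' or any
-- other non-'Add' operation reaching the else branch with nothing stored); B raises there too.
def Pre_solution (operations : List (String × Int)) : Prop := (pvSize operations 0).isSome = true
instance (operations : List (String × Int)) : Decidable (Pre_solution operations) := by unfold Pre_solution; infer_instance

def pvWitness_solution : (List (String × Int)) :=
  [("Add", 3), ("Max", 0), ("Add", 7), ("Add", 5), ("Max", 0), ("Pop", 0), ("Max", 0)]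

def Spec_solution (operations : List (String × Int)) (out : List Int) : Prop := out = solution_alt operations
instance (operations : List (String × Int)) (out : List Int) : Decidable (Spec_solution operations out) := by unfold Spec_solution; infer_instance

-- ===== CLAIM (what is proved, stated in full; the proofs are below) =====
def Claim_equal_solution : Prop := ∀ (operations : List (String × Int)), Dom_solution operations → Pre_solution operations → Spec_solution operations (solution operations)

-- ===== LEMMAS AND PROOFS =====

def IsHeap (h : List Int) : Prop :=
  ∀ j, 0 < j → j < h.length → h.getD ((j - 1) / 2) 0 ≤ h.getD j 0

lemma getD_set_self (l : List Int) (i : Nat) (b : Int) (hi : i < l.length) :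
    (l.set i b).getD i 0 = b := by
  rw [List.getD_eq_getElem _ _ (by simpa using hi)]
  simp

lemma getD_set_ne (l : List Int) (i j : Nat) (b : Int) (hij : i ≠ j) :
    (l.set i b).getD j 0 = l.getD j 0 := by
  rcases lt_or_ge j l.length with hj | hj
  · rw [List.getD_eq_getElem _ _ (by simpa using hj), List.getD_eq_getElem _ _ hj,
      List.getElem_set_ne (by omega)]
  · rw [List.getD_eq_default _ _ (by simpa using hj), List.getD_eq_default _ _ hj]

lemma set_getD_self (l : List Int) (i : Nat) (hi : i < l.length) :
    l.set i (l.getD i 0) = l := by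
  rw [List.getD_eq_getElem _ _ hi]
  exact List.set_getElem_self hi

lemma set_perm_cons : ∀ (l : List Int) (i : Nat) (b : Int), i < l.length →
    (l.set i b).Perm (b :: l.eraseIdx i) := by
  intro l
  induction l with
  | nil => intro i b hi; simp at hi
  | cons hd t ih =>
    intro i b hi
    match i with
    | 0 => simp
    | (m + 1) =>
      simp only [List.set_cons_succ, List.eraseIdx_cons_succ]
      exact ((ih m b (by simpa using hi)).cons hd).trans (List.Perm.swap b hd _)

lemma getD_cons_eraseIdx (l : List Int) (i : Nat) (hi : i < l.length) :
    l.Perm (l.getD i 0 :: l.eraseIdx i) := by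
  have := set_perm_cons l i (l.getD i 0) hi
  rwa [set_getD_self l i hi] at this

lemma set_set_perm : ∀ (l : List Int) (i j : Nat) (a : Int), i < l.length → j < l.length → i ≠ j →
    ((l.set i (l.getD j 0)).set j a).Perm (l.set i a) := by
  intro l
  induction l with
  | nil => intro i j a hi; simp at hi
  | cons hd t ih =>
    intro i j a hi hj hij
    match i, j with
    | 0, 0 => exact absurd rfl hij
    | 0, (m + 1) =>
      have hm : m < t.length := by simpa using hj
      simp only [List.getD_cons_succ, List.set_cons_zero, List.set_cons_succ]
      exact (((set_perm_cons t m a hm).cons _).trans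
        (List.Perm.swap a (t.getD m 0) _)).trans ((getD_cons_eraseIdx t m hm).symm.cons a)
    | (m + 1), 0 =>
      have hm : m < t.length := by simpa using hi
      simp only [List.getD_cons_zero, List.set_cons_succ, List.set_cons_zero]
      exact (((set_perm_cons t m hd hm).cons a).trans
        (List.Perm.swap hd a _)).trans ((set_perm_cons t m a hm).symm.cons hd)
    | (m + 1), (k + 1) =>
      simp only [List.getD_cons_succ, List.set_cons_succ]
      exact (ih m k a (by simpa using hi) (by simpa using hj) (by omega)).cons hd

lemma root_min (h : List Int) (hh : IsHeap h) : ∀ j, j < h.length → h.getD 0 0 ≤ h.getD j 0 := by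
  intro j
  induction j using Nat.strong_induction_on with
  | _ j ih =>
    intro hj
    rcases Nat.eq_zero_or_pos j with rfl | hjpos
    · exact le_refl _
    · exact le_trans (ih ((j - 1) / 2) (by omega) (by omega)) (hh j hjpos hj)

lemma sd_correct : ∀ (pos : Nat) (h : List Int) (x : Int), pos < h.length →
    (∀ j, 0 < j → j < h.length → j ≠ pos →
      (h.set pos x).getD ((j - 1) / 2) 0 ≤ (h.set pos x).getD j 0) →
    (∀ j, 0 < pos → 0 < j → j < h.length → (j - 1) / 2 = pos →
      h.getD ((pos - 1) / 2) 0 ≤ h.getD j 0) →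
    IsHeap (siftdownLoop h x 0 pos) ∧ (siftdownLoop h x 0 pos).Perm (h.set pos x) := by
  intro pos
  induction pos using Nat.strong_induction_on with
  | _ pos ih =>
    intro h x hlen hSD1 hSD2
    rw [siftdownLoop]
    by_cases hp : 0 < pos
    · rw [dif_pos hp]
      have hplt : (pos - 1) / 2 < pos := by omega
      have hplen : (pos - 1) / 2 < h.length := by omega
      by_cases hcmp : x < h.getD ((pos - 1) / 2) 0
      · rw [if_pos hcmp]
        obtain ⟨H1, H2⟩ := ih ((pos - 1) / 2) hplt (h.set pos (h.getD ((pos - 1) / 2) 0)) x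
          (by simpa using hplen)
          (by
            intro j hj0 hjlen hjne
            have hjl : j < h.length := by simpa using hjlen
            by_cases hj : j = pos
            · subst hj
              rw [getD_set_self _ _ _ (by simpa using hplen),
                getD_set_ne _ _ _ _ (by omega), getD_set_self _ _ _ hlen]
              exact le_of_lt hcmp
            · by_cases hpj : (j - 1) / 2 = pos
              · have hjgt : pos < j := by omega
                rw [hpj, getD_set_ne _ _ _ _ (by omega), getD_set_self _ _ _ hlen,
                  getD_set_ne _ _ _ _ (by omega), getD_set_ne _ _ _ _ (by omega)]
                exact hSD2 j hp hj0 hjl hpj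
              · by_cases hpj2 : (j - 1) / 2 = (pos - 1) / 2
                · rw [hpj2, getD_set_self _ _ _ (by simpa using hplen),
                    getD_set_ne _ ((pos - 1) / 2) j _ (by omega), getD_set_ne _ pos j _ (by omega)]
                  have := hSD1 j hj0 hjl hj
                  rw [hpj2, getD_set_ne _ _ _ _ (by omega), getD_set_ne _ _ _ _ (by omega)] at this
                  omega
                · rw [getD_set_ne _ ((pos - 1) / 2) ((j - 1) / 2) _ (by omega),
                    getD_set_ne _ pos ((j - 1) / 2) _ (by omega),
                    getD_set_ne _ ((pos - 1) / 2) j _ (by omega), getD_set_ne _ pos j _ (by omega)]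
                  have := hSD1 j hj0 hjl hj
                  rw [getD_set_ne _ _ _ _ (by omega), getD_set_ne _ _ _ _ (by omega)] at this
                  exact this)
          (by
            intro j hp0 hj0 hjlen hparj
            have hjl : j < h.length := by simpa using hjlen
            have hqlt : ((pos - 1) / 2 - 1) / 2 < (pos - 1) / 2 := by omega
            rw [getD_set_ne _ _ _ _ (by omega)]
            have base : h.getD (((pos - 1) / 2 - 1) / 2) 0 ≤ h.getD ((pos - 1) / 2) 0 := by
              have := hSD1 ((pos - 1) / 2) hp0 hplen (by omega)
              rwa [getD_set_ne _ _ _ _ (by omega), getD_set_ne _ _ _ _ (by omega)] at this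
            by_cases hj : j = pos
            · subst hj
              rw [getD_set_self _ _ _ hlen]
              exact base
            · rw [getD_set_ne _ _ _ _ (by omega)]
              have := hSD1 j hj0 hjl hj
              rw [hparj, getD_set_ne _ _ _ _ (by omega), getD_set_ne _ _ _ _ (by omega)] at this
              omega)
        exact ⟨H1, H2.trans (set_set_perm h pos ((pos - 1) / 2) x hlen hplen (by omega))⟩
      · rw [if_neg hcmp]
        refine ⟨?_, List.Perm.refl _⟩
        intro j hj0 hjlen
        have hjl : j < h.length := by simpa using hjlen
        by_cases hj : j = pos
        · subst hj
          rw [getD_set_ne _ _ _ _ (by omega), getD_set_self _ _ _ hlen]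
          omega
        · exact hSD1 j hj0 hjl hj
    · rw [dif_neg hp]
      refine ⟨?_, List.Perm.refl _⟩
      intro j hj0 hjlen
      have hjl : j < h.length := by simpa using hjlen
      exact hSD1 j hj0 hjl (by omega)

lemma su_step (n : Nat)
    (ihn : ∀ m < n, ∀ (h : List Int) (x : Int) (pos : Nat), h.length - pos = m →
      pos < h.length →
      (∀ j, 0 < j → j < h.length → j ≠ pos → (j - 1) / 2 ≠ pos →
        h.getD ((j - 1) / 2) 0 ≤ h.getD j 0) →
      (∀ j, 0 < pos → 0 < j → j < h.length → (j - 1) / 2 = pos →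
        h.getD ((pos - 1) / 2) 0 ≤ h.getD j 0) →
      IsHeap (siftupLoop h x 0 pos) ∧ (siftupLoop h x 0 pos).Perm (h.set pos x))
    (h : List Int) (x : Int) (pos : Nat) (hn : h.length - pos = n) (hlen : pos < h.length)
    (hUP1 : ∀ j, 0 < j → j < h.length → j ≠ pos → (j - 1) / 2 ≠ pos →
      h.getD ((j - 1) / 2) 0 ≤ h.getD j 0)
    (hUP2 : ∀ j, 0 < pos → 0 < j → j < h.length → (j - 1) / 2 = pos →
      h.getD ((pos - 1) / 2) 0 ≤ h.getD j 0)
    (c : Nat) (hcpar : (c - 1) / 2 = pos) (hcgt : pos < c) (hclen : c < h.length)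
    (hcmin : ∀ j, 0 < j → j < h.length → (j - 1) / 2 = pos → h.getD c 0 ≤ h.getD j 0) :
    IsHeap (siftupLoop (h.set pos (h.getD c 0)) x 0 c) ∧
      (siftupLoop (h.set pos (h.getD c 0)) x 0 c).Perm (h.set pos x) := by
  obtain ⟨H1, H2⟩ := ihn (h.length - c) (by omega) (h.set pos (h.getD c 0)) x c
    (by simp)
    (by simpa using hclen)
    (by
      intro j hj0 hjlen hjne hjpar
      have hjl : j < h.length := by simpa using hjlen
      by_cases hj : j = pos
      · subst hj
        rw [getD_set_ne _ j ((j - 1) / 2) _ (by omega), getD_set_self _ _ _ hlen]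
        exact hUP2 c hj0 (by omega) hclen hcpar
      · by_cases hpj : (j - 1) / 2 = pos
        · rw [hpj, getD_set_self _ _ _ hlen, getD_set_ne _ pos j _ (by omega)]
          exact hcmin j hj0 hjl hpj
        · rw [getD_set_ne _ pos ((j - 1) / 2) _ (by omega), getD_set_ne _ pos j _ (by omega)]
          exact hUP1 j hj0 hjl hj hpj)
    (by
      intro j _ hj0 hjlen hparj
      have hjl : j < h.length := by simpa using hjlen
      rw [hcpar, getD_set_self _ _ _ hlen, getD_set_ne _ pos j _ (by omega)]
      have := hUP1 j hj0 hjl (by omega) (by omega)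
      rwa [hparj] at this)
  exact ⟨H1, H2.trans (set_set_perm h pos c x hlen hclen (by omega))⟩

lemma su_correct : ∀ (n : Nat) (h : List Int) (x : Int) (pos : Nat), h.length - pos = n →
    pos < h.length →
    (∀ j, 0 < j → j < h.length → j ≠ pos → (j - 1) / 2 ≠ pos →
      h.getD ((j - 1) / 2) 0 ≤ h.getD j 0) →
    (∀ j, 0 < pos → 0 < j → j < h.length → (j - 1) / 2 = pos →
      h.getD ((pos - 1) / 2) 0 ≤ h.getD j 0) →
    IsHeap (siftupLoop h x 0 pos) ∧ (siftupLoop h x 0 pos).Perm (h.set pos x) := by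
  intro n
  induction n using Nat.strong_induction_on with
  | _ n ihn =>
    intro h x pos hn hlen hUP1 hUP2
    rw [siftupLoop]
    by_cases hc : 2 * pos + 1 < h.length
    · rw [dif_pos hc]
      by_cases hrc : 2 * pos + 2 < h.length ∧ ¬ (h.getD (2 * pos + 1) 0 < h.getD (2 * pos + 2) 0)
      · rw [if_pos hrc]
        exact su_step n ihn h x pos hn hlen hUP1 hUP2 (2 * pos + 2) (by omega) (by omega) hrc.1
          (by
            intro j hj0 hjl hparj
            have : j = 2 * pos + 1 ∨ j = 2 * pos + 2 := by omega
            rcases this with rfl | rfl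
            · omega
            · exact le_refl _)
      · rw [if_neg hrc]
        exact su_step n ihn h x pos hn hlen hUP1 hUP2 (2 * pos + 1) (by omega) (by omega) hc
          (by
            intro j hj0 hjl hparj
            have : j = 2 * pos + 1 ∨ j = 2 * pos + 2 := by omega
            rcases this with rfl | rfl
            · exact le_refl _
            · have := not_and.mp hrc hjl
              omega)
    · rw [dif_neg hc]
      obtain ⟨H1, H2⟩ := sd_correct pos (h.set pos x) x (by simpa using hlen)
        (by
          intro j hj0 hjlen hjne
          have hjl : j < h.length := by simpa using hjlen
          rw [List.set_set, getD_set_ne _ pos ((j - 1) / 2) _ (by omega),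
            getD_set_ne _ pos j _ (by omega)]
          exact hUP1 j hj0 hjl hjne (by omega))
        (by intro j _ hj0 hjlen hparj; simp at hjlen; omega)
      exact ⟨H1, by rwa [List.set_set] at H2⟩

lemma heappush_correct (h : List Int) (x : Int) (hh : IsHeap h) :
    IsHeap (heappush h x) ∧ (heappush h x).Perm (x :: h) := by
  unfold heappush
  have hlen : h.length < (h ++ [x]).length := by simp
  obtain ⟨H1, H2⟩ := sd_correct h.length (h ++ [x]) x hlen
    (by
      intro j hj0 hjlen hjne
      have hjlt : j < h.length := by simp at hjlen; omega
      rw [getD_set_ne _ h.length ((j - 1) / 2) _ (by omega), getD_set_ne _ h.length j _ (by omega),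
        List.getD_append _ _ _ _ (by omega), List.getD_append _ _ _ _ (by omega)]
      exact hh j hj0 hjlt)
    (by intro j _ hj0 hjlen hpar; simp at hjlen; omega)
  refine ⟨H1, H2.trans ?_⟩
  have hx : (h ++ [x]).getD h.length 0 = x := by
    rw [List.getD_append_right _ _ _ _ (le_refl _)]; simp
  have hset := set_getD_self (h ++ [x]) h.length hlen
  rw [hx] at hset
  rw [hset]
  exact List.perm_append_singleton x h

lemma getD_dropLast (l : List Int) (k : Nat) (hk : k < l.length - 1) :
    l.dropLast.getD k 0 = l.getD k 0 := by
  rw [List.getD_eq_getElem _ _ (by simp; omega), List.getD_eq_getElem _ _ (by omega)]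
  exact List.getElem_dropLast _

lemma heappop_correct (h : List Int) (hh : IsHeap h) (hne : h ≠ []) :
    IsHeap (heappop h) ∧ (heappop h).Perm h.tail := by
  match h with
  | [] => exact absurd rfl hne
  | [a] =>
    constructor
    · intro j hj0 hjlen
      simp [heappop] at hjlen
    · simp [heappop]
  | h0 :: h1 :: u =>
    have hred : heappop (h0 :: h1 :: u) =
        siftupLoop ((h0 :: h1 :: u).getD ((h0 :: h1 :: u).length - 1) 0 :: (h1 :: u).dropLast)
          ((((h0 :: h1 :: u).getD ((h0 :: h1 :: u).length - 1) 0 :: (h1 :: u).dropLast)).getD 0 0)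
          0 0 := by
      simp [heappop, List.dropLast_cons₂]
    rw [hred]
    have hTlen : (h1 :: u).length = u.length + 1 := by simp
    have hRlen : ((h0 :: h1 :: u).getD ((h0 :: h1 :: u).length - 1) 0 :: (h1 :: u).dropLast).length
        = u.length + 1 := by simp
    obtain ⟨H1, H2⟩ := su_correct (u.length + 1)
      ((h0 :: h1 :: u).getD ((h0 :: h1 :: u).length - 1) 0 :: (h1 :: u).dropLast)
      ((((h0 :: h1 :: u).getD ((h0 :: h1 :: u).length - 1) 0 :: (h1 :: u).dropLast)).getD 0 0)
      0 (by simp) (by simp)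
      (by
        intro j hj0 hjl hjne hjpar
        rw [hRlen] at hjl
        have e : ∀ k, 0 < k → k < u.length + 1 →
            ((h0 :: h1 :: u).getD ((h0 :: h1 :: u).length - 1) 0 :: (h1 :: u).dropLast).getD k 0
              = (h0 :: h1 :: u).getD k 0 := by
          intro k hk0 hkl
          match k, hk0 with
          | (m + 1), _ =>
            rw [List.getD_cons_succ, List.getD_cons_succ, getD_dropLast _ _ (by simp; omega)]
        rw [e j hj0 hjl, e ((j - 1) / 2) (by omega) (by omega)]
        exact hh j hj0 (by simp; omega)
      )
      (by intro j hpos0; omega)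
    refine ⟨H1, ?_⟩
    rw [set_getD_self _ _ (by simp)] at H2
    refine H2.trans ?_
    show ((h0 :: h1 :: u).getD ((h0 :: h1 :: u).length - 1) 0 :: (h1 :: u).dropLast).Perm (h1 :: u)
    have hlast : (h0 :: h1 :: u).getD ((h0 :: h1 :: u).length - 1) 0
        = (h1 :: u).getLast (by simp) := by
      rw [List.getD_eq_getElem _ _ (by simp), List.getLast_eq_getElem]
      simp
    rw [hlast]
    refine (List.perm_append_singleton _ _).symm.trans ?_
    rw [List.dropLast_concat_getLast (by simp : h1 :: u ≠ [])]

lemma le_getLastD_of_sorted : ∀ (s : List Int) (d : Int), s.Pairwise (· ≤ ·) →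
    ∀ x ∈ s, x ≤ s.getLastD d := by
  intro s
  induction s with
  | nil => simp
  | cons a t ih =>
    intro d hs x hx
    rw [List.getLastD_cons]
    rcases List.mem_cons.mp hx with rfl | hxt
    · cases t with
      | nil => simp
      | cons b u =>
        have hab : x ≤ b := (List.pairwise_cons.mp hs).1 b (by simp)
        have hbu : b ≤ (b :: u).getLastD x := ih x (List.pairwise_cons.mp hs).2 b (by simp)
        omega
    · exact ih a (List.pairwise_cons.mp hs).2 x hxt

lemma getLastD_mem : ∀ (s : List Int) (d : Int), s ≠ [] → s.getLastD d ∈ s := by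
  intro s
  induction s with
  | nil => intro d h; exact absurd rfl h
  | cons a t ih =>
    intro d _
    rw [List.getLastD_cons]
    cases t with
    | nil => simp
    | cons b u => exact List.mem_cons_of_mem a (ih a (by simp))

lemma root_eq (h s : List Int) (hh : IsHeap h) (hp : h.Perm (s.map (fun v => -v)))
    (hs : s.Pairwise (· ≤ ·)) (hne : s ≠ []) : h.getD 0 0 = -(s.getLastD 0) := by
  have hlen : h.length = s.length := by simpa using hp.length_eq
  have hpos : 0 < h.length := by
    rw [hlen]; exact List.length_pos_iff.mpr hne
  have hm : s.getLastD 0 ∈ s := getLastD_mem s 0 hne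
  have h1 : -(s.getLastD 0) ∈ h := hp.mem_iff.mpr (List.mem_map.mpr ⟨s.getLastD 0, hm, rfl⟩)
  obtain ⟨j, hj, hje⟩ := List.mem_iff_getElem.mp h1
  have hle1 : h.getD 0 0 ≤ -(s.getLastD 0) := by
    have := root_min h hh j hj
    rwa [List.getD_eq_getElem _ _ hj, hje] at this
  have h0mem : h.getD 0 0 ∈ h := by
    rw [List.getD_eq_getElem _ _ hpos]; exact List.getElem_mem _
  obtain ⟨y, hy, hye⟩ := List.mem_map.mp (hp.mem_iff.mp h0mem)
  have hym : y ≤ s.getLastD 0 := le_getLastD_of_sorted s 0 hs y hy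
  omega

lemma loop_eq : ∀ (ops : List (String × Int)) (h s out : List Int),
    IsHeap h → h.Perm (s.map (fun v => -v)) → s.Pairwise (· ≤ ·) →
    (pvSize ops s.length).isSome = true →
    solutionLoop ops h out = solutionAltLoop ops s out := by
  intro ops
  induction ops with
  | nil => intro h s out _ _ _ _; rfl
  | cons pr rest ih =>
    obtain ⟨op, v⟩ := pr
    intro h s out hh hp hs hpre
    have hlen : h.length = s.length := by simpa using hp.length_eq
    have hnei : (h ≠ []) ↔ (s ≠ []) := by
      rw [← List.length_pos_iff, ← List.length_pos_iff, hlen]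
    by_cases hAdd : op = "Add"
    · rw [solutionLoop, solutionAltLoop, if_pos hAdd, if_pos hAdd]
      rw [pvSize, if_pos hAdd] at hpre
      obtain ⟨P1, P2⟩ := heappush_correct h (-v) hh
      refine ih (heappush h (-v)) (List.orderedInsert (· ≤ ·) v s) out P1 ?_ ?_ ?_
      · exact P2.trans ((hp.cons (-v)).trans
          (List.Perm.map _ (List.perm_orderedInsert _ v s)).symm)
      · exact List.Pairwise.orderedInsert v s hs
      · rwa [List.orderedInsert_length]
    · by_cases hMax : op = "Max" ∧ s ≠ []
      · have hsne : s ≠ [] := hMax.2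
        have hk0 : s.length ≠ 0 := by
          simpa [List.length_eq_zero_iff] using hsne
        rw [solutionLoop, solutionAltLoop, if_neg hAdd, if_neg hAdd,
          if_pos (⟨hMax.1, hnei.mpr hsne⟩ : op = "Max" ∧ h ≠ []), if_pos hMax]
        rw [pvSize, if_neg hAdd, if_pos ⟨hMax.1, hk0⟩] at hpre
        rw [root_eq h s hh hp hs hsne, neg_neg]
        exact ih h s _ hh hp hs hpre
      · have hk0 : s.length ≠ 0 := by
          intro hz
          rw [pvSize, if_neg hAdd, if_neg (by simp [hz]), if_neg (by simp [hz])] at hpre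
          simp at hpre
        have hsne : s ≠ [] := by simpa [← List.length_eq_zero_iff] using hk0
        have hhne : h ≠ [] := hnei.mpr hsne
        have hnMax : ¬ (op = "Max" ∧ h ≠ []) := by
          intro ⟨h1, _⟩; exact hMax ⟨h1, hsne⟩
        rw [solutionLoop, solutionAltLoop, if_neg hAdd, if_neg hAdd,
          if_neg hnMax, if_neg hMax]
        rw [pvSize, if_neg hAdd, if_neg (by intro ⟨_, h2⟩; exact hMax ⟨‹op = "Max"›, hsne⟩),
          if_pos hk0] at hpre
        obtain ⟨P1, P2⟩ := heappop_correct h hh hhne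
        have hlastD : s.getLastD 0 = s.getLast hsne := by
          rw [List.getLastD_eq_getLast?, List.getLast?_eq_some_getLast hsne]
          rfl
        have htl : h.tail.Perm (s.dropLast.map (fun v => -v)) := by
          obtain ⟨a, t, rfl⟩ := List.exists_cons_of_ne_nil hhne
          have ha : a = -(s.getLastD 0) := root_eq (a :: t) s hh hp hs hsne
          have hsplit : s.dropLast ++ [s.getLastD 0] = s := by
            rw [hlastD]
            exact List.dropLast_concat_getLast hsne
          have hmap : s.map (fun v => -v) = s.dropLast.map (fun v => -v) ++ [a] := by
            conv_lhs => rw [← hsplit]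
            simp [ha]
          have : (a :: t).Perm (a :: s.dropLast.map (fun v => -v)) := by
            refine hp.trans ?_
            rw [hmap]
            exact List.perm_append_singleton _ _
          exact this.cons_inv
        refine ih (heappop h) s.dropLast out P1 (P2.trans htl)
          (List.Pairwise.sublist (List.dropLast_sublist s) hs) ?_
        rwa [List.length_dropLast]

-- ===== VERDICT (by name: the statement is the Claim_ definition above) =====
theorem solution_spec : Claim_equal_solution := by
  intro ops _ hpre
  unfold Spec_solution solution solution_alt
  exact loop_eq ops [] [] [] (by intro j _ hlen; simp at hlen) (by simp) (by simp) hpre
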